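-- pv_equiv track=rewrite | github.com/DavidKrell/ProjectAlice | classifier.py | calculate_term_doc_vector
-- ===== SOURCE A (Python) =====
-- def calculate_term_doc_vector(string_arr, terms):
--     """Calculates the term document vector for a given string."""
--     string_arr = string_arr.lower().split()
--     anzahl_terms = len(terms)
--     term_doc_vector = [0] * anzahl_terms
--
--     for word in string_arr:
--         for i in range(len(terms)):
--             term = terms[i]
--             if term == word:
--                 term_doc_vector[i] = term_doc_vector[i] + 1
--
--     return term_doc_vector
-- ===== SOURCE B (Python) =====
-- from collections import Counter
--
-- def calculate_term_doc_vector(string_arr, terms):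
--     """Calculates the term document vector for a given string."""
--     counts = Counter(string_arr.lower().split())
--     return [counts[term] for term in terms]
-- ===== Notes on version B (the rewrite author's own statement) =====
-- stated objective: simpler
-- what changed: Replaces the nested word-by-term index scan with a single-pass Counter over the words followed by one lookup pass over terms.
import Mathlib
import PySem

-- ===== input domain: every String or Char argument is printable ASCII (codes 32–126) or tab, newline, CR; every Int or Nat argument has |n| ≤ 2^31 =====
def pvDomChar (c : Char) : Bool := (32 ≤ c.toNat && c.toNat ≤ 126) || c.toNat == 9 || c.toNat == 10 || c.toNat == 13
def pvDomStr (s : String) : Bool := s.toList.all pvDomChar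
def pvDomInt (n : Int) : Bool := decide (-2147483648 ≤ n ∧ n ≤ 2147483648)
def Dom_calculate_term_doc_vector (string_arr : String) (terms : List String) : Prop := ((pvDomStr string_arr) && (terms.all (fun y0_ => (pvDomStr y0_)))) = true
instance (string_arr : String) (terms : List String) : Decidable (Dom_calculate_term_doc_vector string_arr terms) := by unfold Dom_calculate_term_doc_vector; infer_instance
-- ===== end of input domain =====

-- B replaces A's nested word×term index scan with a one-pass word-frequency table (Counter) plus one lookup pass over terms (objective: simpler).

-- ===== PORT A =====
-- literal port: lower+split, a zero vector, then for each word, for i in range(len(terms)), increment vec[i] on match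
def calculate_term_doc_vector (string_arr : String) (terms : List String) : List Int :=
  let words := PySem.Str.split₀ (PySem.Str.lower string_arr)
  let anzahl_terms := terms.length
  let term_doc_vector := List.replicate anzahl_terms (0 : Int)
  words.foldl (fun vec word =>
    (PySem.List.pyRange 0 (anzahl_terms : Int) 1).foldl (fun v i =>
      let term := PySem.List.pyGetD terms i ""
      if term == word then v.set i.toNat (PySem.List.pyGetD v i 0 + 1) else v) vec)
    term_doc_vector

-- ===== PORT B =====
-- Counter over the words, then one lookup per term (Counter yields 0 for absent keys)
def calculate_term_doc_vector_alt (string_arr : String) (terms : List String) : List Int :=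
  let counts := PySem.Dict.counter (PySem.Str.split₀ (PySem.Str.lower string_arr))
  terms.map (fun term => counts.getD term 0)

-- ===== PRECONDITION & SPEC =====
def Spec_calculate_term_doc_vector (string_arr : String) (terms : List String) (out : List Int) : Prop := out = calculate_term_doc_vector_alt string_arr terms
instance (string_arr : String) (terms : List String) (out : List Int) : Decidable (Spec_calculate_term_doc_vector string_arr terms out) := by unfold Spec_calculate_term_doc_vector; infer_instance

-- ===== CLAIM (what is proved, stated in full; the proofs are below) =====
def Claim_equal_calculate_term_doc_vector : Prop := ∀ (string_arr : String) (terms : List String), Dom_calculate_term_doc_vector string_arr terms → Spec_calculate_term_doc_vector string_arr terms (calculate_term_doc_vector string_arr terms)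

-- ===== LEMMAS AND PROOFS =====

-- proof-only name for the body of A's inner index loop
def pvStep (terms : List String) (word : String) (v : List Int) (i : Int) : List Int :=
  let term := PySem.List.pyGetD terms i ""
  if term == word then v.set i.toNat (PySem.List.pyGetD v i 0 + 1) else v

-- A's inner index loop, started on a vector of the shape terms.map g (entries a function of the
-- term at the same index), bumps exactly the entries whose term equals word.
lemma pv_inner_loop_eq (word : String) (g : String → Int) (terms : List String) (rest : List String) :
    ∀ (k : Nat), terms.drop k = rest →
    (PySem.List.pyRange (k : Int) (terms.length : Int) 1).foldl (pvStep terms word)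
      ((terms.take k).map (fun t => if t == word then g t + 1 else g t) ++ rest.map g)
    = terms.map (fun t => if t == word then g t + 1 else g t) := by
  induction rest with
  | nil =>
    intro k h
    have hk : terms.length ≤ k := List.drop_eq_nil_iff.mp h
    rw [PySem.List.pyRange_one_eq_nil (by exact_mod_cast hk)]
    simp [List.take_of_length_le hk]
  | cons t ts ih =>
    intro k h
    have hklt : k < terms.length := by
      by_contra hc
      rw [List.drop_eq_nil_iff.mpr (by omega)] at h
      simp at h
    have hdrop := List.drop_eq_getElem_cons hklt
    rw [hdrop] at h
    have hget : terms[k]'hklt = t := (List.cons.injEq _ _ _ _ ▸ h).1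
    have hts : terms.drop (k+1) = ts := (List.cons.injEq _ _ _ _ ▸ h).2
    rw [PySem.List.pyRange_one_cons (by exact_mod_cast hklt)]
    simp only [List.foldl_cons]
    have hlen : ((terms.take k).map (fun t => if t == word then g t + 1 else g t)).length = k := by
      simp [Nat.min_eq_left hklt.le]
    have htake : terms.take (k+1) = terms.take k ++ [t] := by
      rw [List.take_succ_eq_append_getElem hklt, hget]
    have step_eval : pvStep terms word
        ((terms.take k).map (fun t => if t == word then g t + 1 else g t) ++ (t :: ts).map g) (k : Int)
        = (terms.take (k+1)).map (fun t => if t == word then g t + 1 else g t) ++ ts.map g := by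
      unfold pvStep
      rw [PySem.List.pyGetD_eq_getElem terms "" (Int.natCast_nonneg k) (by exact_mod_cast hklt)]
      simp only [Int.toNat_natCast, hget, List.map_cons]
      by_cases hw : (t == word) = true
      · have hlt : (k : Int) < (((terms.take k).map (fun t => if t == word then g t + 1 else g t)
            ++ g t :: ts.map g).length : Int) := by
          simp; omega
        rw [if_pos hw,
          PySem.List.pyGetD_eq_getElem _ 0 (Int.natCast_nonneg k) hlt]
        simp only [Int.toNat_natCast]
        rw [List.getElem_append_right (le_of_eq hlen),
          List.set_append_right _ _ (le_of_eq hlen)]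
        have htw : t = word := by simpa using hw
        simp [Nat.min_eq_left hklt.le, htake, htw]
      · rw [if_neg hw]
        have htw : ¬ t = word := by simpa using hw
        simp [htake, htw]
    rw [step_eval]
    have hcast : (k : Int) + 1 = ((k + 1 : Nat) : Int) := by push_cast; ring
    rw [hcast]
    exact ih (k+1) hts

-- the inner loop started from the whole vector (k = 0)
lemma pv_inner_loop_eq_zero (word : String) (g : String → Int) (terms : List String) :
    (PySem.List.pyRange 0 (terms.length : Int) 1).foldl (pvStep terms word) (terms.map g)
    = terms.map (fun t => if t == word then g t + 1 else g t) := by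
  have h := pv_inner_loop_eq word g terms terms 0 rfl
  simpa using h

-- A's outer loop over the words keeps the vector of the shape terms.map g, accumulating counts
lemma pv_outer_loop_eq (words terms : List String) :
    ∀ (g : String → Int),
    words.foldl (fun vec word =>
      (PySem.List.pyRange 0 (terms.length : Int) 1).foldl (pvStep terms word) vec)
      (terms.map g)
    = terms.map (fun t => g t + (List.count t words : Int)) := by
  induction words with
  | nil => intro g; simp
  | cons w ws ih =>
    intro g
    simp only [List.foldl_cons]
    rw [pv_inner_loop_eq_zero w g terms, ih]
    apply List.map_congr_left
    intro t _
    by_cases hw : (t == w) = true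
    · have htw : t = w := by simpa using hw
      simp [htw]
      ring
    · have htw : ¬ t = w := by simpa using hw
      simp [Ne.symm htw]
      exact htw

-- ===== VERDICT (by name: the statement is the Claim_ definition above) =====
theorem calculate_term_doc_vector_spec : Claim_equal_calculate_term_doc_vector := by
  intro s terms _
  unfold Spec_calculate_term_doc_vector
  have hA : calculate_term_doc_vector s terms
      = (PySem.Str.split₀ (PySem.Str.lower s)).foldl
          (fun vec word =>
            (PySem.List.pyRange 0 (terms.length : Int) 1).foldl (pvStep terms word) vec)
          (List.replicate terms.length (0 : Int)) := rfl
  have hB : calculate_term_doc_vector_alt s terms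
      = terms.map (fun t =>
          (PySem.Dict.counter (PySem.Str.split₀ (PySem.Str.lower s))).getD t 0) := rfl
  have hrep : List.replicate terms.length (0 : Int) = terms.map (fun _ => (0:Int)) := by
    simp [List.map_const']
  rw [hA, hB, hrep, pv_outer_loop_eq]
  simp [PySem.Dict.getD_counter]
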